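-- pv_equiv track=rewrite | github.com/glpalma/unicamp-mc102 | tarefa11/frequencia.py | calcular_histograma_palavras
-- ===== SOURCE A (Python) =====
-- def frequencia_tupla(tupla): # usada na ordenação do histograma
--     return tupla[1]
--
-- def calcular_histograma_palavras(lista_palavras, excecoes):
--     """Retorna um histograma de palavras fornecidas como argumento
--     sem contar palavras fornecidas em excecoes."""
--     histograma = dict()
--
--     for palavra in lista_palavras:
--         if palavra not in excecoes:
--             if palavra not in histograma:
--                 histograma[palavra] = 1
--             else:
--                 histograma[palavra] += 1
--
--     histograma = list(histograma.items())
--     histograma.sort(key=frequencia_tupla, reverse=True) # ordenar o histograma a partir das frequências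
--     n = len(histograma)
--
--     for _ in range(n-1):
--         for j in range(n-1):
--             if histograma[j][1] == histograma[j+1][1]:
--                 if histograma[j][0] > histograma[j+1][0]:
--                     aux_f = histograma[j]
--                     histograma[j] = histograma[j+1]
--                     histograma[j+1] = aux_f
--
--     return histograma
-- ===== SOURCE B (Python) =====
-- def calcular_histograma_palavras(lista_palavras, excecoes):
--     """Retorna um histograma de palavras fornecidas como argumento
--     sem contar palavras fornecidas em excecoes."""
--     restantes = sorted(p for p in lista_palavras if p not in excecoes)
--     histograma = []
--     i = 0
--     n = len(restantes)
--     while i < n: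
--         j = i
--         while j < n and restantes[j] == restantes[i]:
--             j += 1
--         histograma.append((restantes[i], j - i))
--         i = j
--     histograma.sort(key=lambda t: -t[1])  # stable: alphabetical order kept within equal counts
--     return histograma
-- ===== Notes on version B (the rewrite author's own statement) =====
-- stated objective: faster
-- what changed: Replaces dict-accumulation counting plus an O(n^2) double bubble pass for the alphabetical tie-break by sort-then-group run-length counting followed by one stable sort on -count.
import Mathlib
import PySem

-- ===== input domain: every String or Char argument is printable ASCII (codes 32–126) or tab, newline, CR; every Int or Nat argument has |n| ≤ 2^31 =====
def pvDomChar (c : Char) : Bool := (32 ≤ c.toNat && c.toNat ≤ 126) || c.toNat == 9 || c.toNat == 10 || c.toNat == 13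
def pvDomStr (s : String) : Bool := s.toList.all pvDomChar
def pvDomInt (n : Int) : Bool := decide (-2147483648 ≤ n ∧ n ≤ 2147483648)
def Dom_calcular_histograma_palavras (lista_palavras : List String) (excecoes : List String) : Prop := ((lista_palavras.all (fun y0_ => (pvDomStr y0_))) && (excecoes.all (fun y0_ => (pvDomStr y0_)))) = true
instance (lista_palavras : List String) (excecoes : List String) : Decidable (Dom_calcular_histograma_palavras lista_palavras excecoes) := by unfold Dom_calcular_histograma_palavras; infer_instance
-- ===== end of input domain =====

-- B replaces A's dict counting + O(n^2) bubble tie-break by sort-group-count + one stable sort (faster).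

-- ===== PORT A =====
def frequencia_tupla (tupla : String × Int) : Int := tupla.2  -- tupla[1] on a 2-tuple

-- body of A's inner bubble loop: compare histograma[j] with histograma[j+1], swap on tie-of-counts
-- with out-of-order words; j comes from range(n-1) so j ≥ 0 and j+1 < n: toNat/getD defaults never matter
def pvBubbleStep (h : List (String × Int)) (j : Int) : List (String × Int) :=
  let a := PySem.List.pyGetD h j ("", 0)
  let b := PySem.List.pyGetD h (j + 1) ("", 0)
  if a.2 == b.2 then
    if b.1 < a.1 then (h.set j.toNat b).set (j + 1).toNat a
    else h
  else h

def calcular_histograma_palavras (lista_palavras : List String) (excecoes : List String) : List (String × Int) :=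
  let histograma : PySem.Dict String Int :=
    lista_palavras.foldl (fun d palavra =>
      if excecoes.contains palavra = false then
        if d.contains palavra = false then d.insert palavra 1
        else d.insert palavra (d.getD palavra 0 + 1)
      else d) PySem.Dict.empty
  let hist := PySem.List.sorted histograma.items frequencia_tupla true
  let n : Int := hist.length
  (PySem.List.pyRange 0 (n - 1) 1).foldl
    (fun h _ => (PySem.List.pyRange 0 (n - 1) 1).foldl pvBubbleStep h) hist

-- ===== PORT B =====
-- the two nested while loops of Source B: emit (word, run length) for each maximal run of the sorted list
def pvGroupRuns : List String → List (String × Int)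
  | [] => []
  | w :: t =>
    (w, 1 + ((t.takeWhile (fun x => x == w)).length : Int)) ::
      pvGroupRuns (t.dropWhile (fun x => x == w))
termination_by l => l.length
decreasing_by
  simp only [List.length_cons]
  exact Nat.lt_succ_of_le (List.length_dropWhile_le _ _)

def calcular_histograma_palavras_alt (lista_palavras : List String) (excecoes : List String) : List (String × Int) :=
  let restantes := PySem.List.sorted (lista_palavras.filter (fun p => !(excecoes.contains p))) (fun x => x)
  let histograma := pvGroupRuns restantes
  PySem.List.sorted histograma (fun t => -t.2)

-- ===== PRECONDITION & SPEC =====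
def Spec_calcular_histograma_palavras (lista_palavras : List String) (excecoes : List String) (out : List (String × Int)) : Prop := out = calcular_histograma_palavras_alt lista_palavras excecoes
instance (lista_palavras : List String) (excecoes : List String) (out : List (String × Int)) : Decidable (Spec_calcular_histograma_palavras lista_palavras excecoes out) := by unfold Spec_calcular_histograma_palavras; infer_instance

-- ===== CLAIM (what is proved, stated in full; the proofs are below) =====
def Claim_equal_calcular_histograma_palavras : Prop := ∀ (lista_palavras : List String) (excecoes : List String), Dom_calcular_histograma_palavras lista_palavras excecoes → Spec_calcular_histograma_palavras lista_palavras excecoes (calcular_histograma_palavras lista_palavras excecoes)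

-- ===== LEMMAS AND PROOFS =====

-- the order both programs realise: count descending, then word ascending
def pvRle (p q : String × Int) : Prop := q.2 < p.2 ∨ (p.2 = q.2 ∧ p.1 ≤ q.1)
-- count non-increasing (what the reverse sort by frequency guarantees)
def pvGeCnt (p q : String × Int) : Prop := q.2 ≤ p.2
-- injective linear-order key realising pvRle
def pvKey (p : String × Int) : Lex (Int × String) := toLex (-p.2, p.1)

-- one bubble pass, as a recursion on the list (proved equal to A's indexed inner loop in pvBridge)
def pvPass : List (String × Int) → List (String × Int)
  | [] => []
  | [x] => [x]
  | x :: y :: t =>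
    if x.2 == y.2 then
      if y.1 < x.1 then y :: pvPass (x :: t) else x :: pvPass (y :: t)
    else x :: pvPass (y :: t)
termination_by l => l.length

lemma pvRle_iff (p q : String × Int) : pvRle p q ↔ pvKey p ≤ pvKey q := by
  rw [pvRle, pvKey, pvKey, Prod.Lex.le_iff]
  simp only [ofLex_toLex]
  constructor
  · rintro (h | ⟨h1, h2⟩)
    · exact Or.inl (by omega)
    · exact Or.inr ⟨by omega, h2⟩
  · rintro (h | ⟨h1, h2⟩)
    · exact Or.inl (by omega)
    · exact Or.inr ⟨by omega, h2⟩

lemma pvKey_inj : Function.Injective pvKey := by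
  intro p q h
  have h2 := congrArg ofLex h
  simp only [pvKey, ofLex_toLex, Prod.mk.injEq] at h2
  exact Prod.ext h2.2 (by omega)

lemma pvPass_perm (l : List (String × Int)) : (pvPass l).Perm l := by
  induction l using pvPass.induct with
  | case1 => simp [pvPass]
  | case2 x => simp [pvPass]
  | case3 x y t h1 h2 ih =>
    simp only [pvPass, h1, h2, if_true]
    exact (ih.cons y).trans (List.Perm.swap x y t)
  | case4 x y t h1 h2 ih =>
    simp only [pvPass, h1, h2, Bool.false_eq_true, if_false, if_true]
    exact ih.cons x
  | case5 x y t h1 ih =>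
    simp only [pvPass, h1, Bool.false_eq_true, if_false]
    exact ih.cons x

lemma pvPass_short (l : List (String × Int)) (h : l.length ≤ 1) : pvPass l = l := by
  cases l with
  | nil => simp [pvPass]
  | cons x t =>
    cases t with
    | nil => simp [pvPass]
    | cons y t' => simp at h

lemma pvPass_pairwise_geCnt (l : List (String × Int)) (h : l.Pairwise pvGeCnt) :
    (pvPass l).Pairwise pvGeCnt := by
  induction l using pvPass.induct with
  | case1 => simpa [pvPass] using h
  | case2 x => simpa [pvPass] using h
  | case3 x y t h1 h2 ih =>
    simp only [pvPass, h1, h2, if_true]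
    rw [List.pairwise_cons] at h ⊢
    obtain ⟨hx, h⟩ := h
    rw [List.pairwise_cons] at h
    obtain ⟨hy, ht⟩ := h
    have heq : x.2 = y.2 := by simpa using h1
    refine ⟨?_, ih (List.pairwise_cons.mpr ⟨fun z hz => hx z (List.mem_cons_of_mem _ hz), ht⟩)⟩
    intro z hz
    have hz' := (pvPass_perm (x :: t)).mem_iff.mp hz
    rcases List.mem_cons.mp hz' with rfl | hz''
    · simp [pvGeCnt, heq]
    · have := hy z hz''
      simp only [pvGeCnt] at *
      omega
  | case4 x y t h1 h2 ih =>
    simp only [pvPass, h1, h2, if_true, if_false]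
    rw [List.pairwise_cons] at h ⊢
    obtain ⟨hx, h⟩ := h
    refine ⟨?_, ih h⟩
    intro z hz
    exact hx z ((pvPass_perm (y :: t)).mem_iff.mp hz)
  | case5 x y t h1 ih =>
    simp only [pvPass, h1, Bool.false_eq_true, if_false]
    rw [List.pairwise_cons] at h ⊢
    obtain ⟨hx, h⟩ := h
    refine ⟨?_, ih h⟩
    intro z hz
    exact hx z ((pvPass_perm (y :: t)).mem_iff.mp hz)

lemma pvPass_length (l : List (String × Int)) : (pvPass l).length = l.length :=
  (pvPass_perm l).length_eq

lemma pvPass_last : ∀ (t : List (String × Int)) (x : String × Int),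
    (x :: t).Pairwise pvGeCnt →
    ∃ q m, pvPass (x :: t) = q ++ [m] ∧ ∀ z ∈ x :: t, pvRle z m := by
  intro t
  induction t with
  | nil =>
    intro x _
    exact ⟨[], x, by simp [pvPass], by rintro z hz; simp at hz; subst hz; right; exact ⟨rfl, le_refl _⟩⟩
  | cons y t ih =>
    intro x h
    have hxy : pvGeCnt x y := (List.pairwise_cons.mp h).1 y (by simp)
    have hxt : (x :: t).Pairwise pvGeCnt := by
      rw [List.pairwise_cons] at h
      obtain ⟨hx, h2⟩ := h
      rw [List.pairwise_cons] at h2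
      exact List.pairwise_cons.mpr ⟨fun z hz => hx z (List.mem_cons_of_mem _ hz), h2.2⟩
    have hyt : (y :: t).Pairwise pvGeCnt := (List.pairwise_cons.mp h).2
    by_cases h1 : (x.2 == y.2) = true
    · by_cases h2 : y.1 < x.1
      · obtain ⟨q, m, he, hall⟩ := ih x hxt
        refine ⟨y :: q, m, by simp [pvPass, h1, h2, he], ?_⟩
        intro z hz
        rcases List.mem_cons.mp hz with hzx | hz'
        · rw [hzx]
          exact hall x (by simp)
        rcases List.mem_cons.mp hz' with hzy | hz''
        · rw [hzy]
          have hx := hall x (by simp)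
          have heq : x.2 = y.2 := by simpa using h1
          rcases hx with hlt | ⟨he2, hle⟩
          · left; omega
          · right; exact ⟨by omega, le_of_lt (lt_of_lt_of_le h2 hle)⟩
        · exact hall z (by simp [hz''])
      · obtain ⟨q, m, he, hall⟩ := ih y hyt
        refine ⟨x :: q, m, by simp [pvPass, h1, h2, he], ?_⟩
        intro z hz
        rcases List.mem_cons.mp hz with hzx | hz'
        · rw [hzx]
          have hy := hall y (by simp)
          have heq : x.2 = y.2 := by simpa using h1
          push_neg at h2
          rcases hy with hlt | ⟨he2, hle⟩
          · left; omega
          · right; exact ⟨by omega, le_trans h2 hle⟩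
        · exact hall z hz'
    · obtain ⟨q, m, he, hall⟩ := ih y hyt
      refine ⟨x :: q, m, by simp [pvPass, h1, he], ?_⟩
      intro z hz
      rcases List.mem_cons.mp hz with hzx | hz'
      · rw [hzx]
        have hy := hall y (by simp)
        have hne : ¬ (x.2 = y.2) := by simpa using h1
        have : y.2 ≤ x.2 := hxy
        rcases hy with hlt | ⟨he2, _⟩
        · left; omega
        · left; omega
      · exact hall z hz'

lemma pvPass_append_max : ∀ (q : List (String × Int)) (m : String × Int),
    (∀ z ∈ q, pvRle z m) → pvPass (q ++ [m]) = pvPass q ++ [m] := by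
  intro q
  induction q using pvPass.induct with
  | case1 => intro m _; simp [pvPass]
  | case2 x =>
    intro m hall
    have hxm := hall x (by simp)
    have h1 : ¬ ((x.2 == m.2) = true ∧ m.1 < x.1) := by
      rintro ⟨ha, hb⟩
      have : x.2 = m.2 := by simpa using ha
      rcases hxm with h | ⟨_, hle⟩
      · omega
      · exact absurd hb (not_lt.mpr hle)
    by_cases hc : (x.2 == m.2) = true
    · have : ¬ m.1 < x.1 := fun hb => h1 ⟨hc, hb⟩
      simp [pvPass, hc, this]
    · simp [pvPass, hc]
  | case3 x y t h1 h2 ih =>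
    intro m hall
    have hx := ih m (fun z hz => hall z (by
      rcases List.mem_cons.mp hz with hz1 | hz2
      · simp [hz1]
      · simp [hz2]))
    show pvPass (x :: y :: (t ++ [m])) = _
    simp only [pvPass, h1, h2, if_true]
    rw [show x :: (t ++ [m]) = (x :: t) ++ [m] from rfl, hx]
    simp
  | case4 x y t h1 h2 ih =>
    intro m hall
    have hy := ih m (fun z hz => hall z (by
      rcases List.mem_cons.mp hz with hz1 | hz2
      · simp [hz1]
      · simp [hz2]))
    show pvPass (x :: y :: (t ++ [m])) = _
    simp only [pvPass, h1, h2, if_true, if_false]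
    rw [show y :: (t ++ [m]) = (y :: t) ++ [m] from rfl, hy]
    simp [pvPass, h1, h2]
  | case5 x y t h1 ih =>
    intro m hall
    have hy := ih m (fun z hz => hall z (by
      rcases List.mem_cons.mp hz with hz1 | hz2
      · simp [hz1]
      · simp [hz2]))
    show pvPass (x :: y :: (t ++ [m])) = _
    simp only [pvPass, h1, Bool.false_eq_true, if_false]
    rw [show y :: (t ++ [m]) = (y :: t) ++ [m] from rfl, hy]
    simp [pvPass, h1]

lemma pvIter_perm (k : Nat) (l : List (String × Int)) : (pvPass^[k] l).Perm l := by
  induction k generalizing l with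
  | zero => simp
  | succ k ih =>
    rw [Function.iterate_succ_apply]
    exact (ih (pvPass l)).trans (pvPass_perm l)

lemma pvIter_append_max (k : Nat) : ∀ (q : List (String × Int)) (m : String × Int),
    (∀ z ∈ q, pvRle z m) → pvPass^[k] (q ++ [m]) = pvPass^[k] q ++ [m] := by
  induction k with
  | zero => intro q m _; simp
  | succ k ih =>
    intro q m hall
    rw [Function.iterate_succ_apply, Function.iterate_succ_apply,
        pvPass_append_max q m hall]
    exact ih (pvPass q) m (fun z hz => hall z ((pvPass_perm q).mem_iff.mp hz))

lemma pvIter_sorted : ∀ (N : Nat) (l : List (String × Int)) (k : Nat), l.length ≤ N →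
    l.length ≤ k + 1 → l.Pairwise pvGeCnt → (pvPass^[k] l).Pairwise pvRle := by
  intro N
  induction N with
  | zero =>
    intro l k hN _ _
    have : l = [] := List.length_eq_zero_iff.mp (Nat.le_zero.mp hN)
    subst this
    rw [Function.iterate_fixed (pvPass_short [] (by simp))]
    simp
  | succ N ih =>
    intro l k hN hk hp
    by_cases hshort : l.length ≤ 1
    · rw [Function.iterate_fixed (pvPass_short l hshort)]
      match l, hshort with
      | [], _ => simp
      | [x], _ => simp
    · -- l has ≥ 2 elements, so k ≥ 1
      match l, hshort, hN, hk, hp with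
      | [x], hshort, _, _, _ => exact absurd (by simp) hshort
      | x :: y :: t, hshort, hN, hk, hp =>
        obtain ⟨k, rfl⟩ : ∃ k', k = k' + 1 := by
          refine ⟨k - 1, ?_⟩
          simp at hk
          omega
        rw [Function.iterate_succ_apply]
        obtain ⟨q, m, he, hall⟩ := pvPass_last (y :: t) x hp
        have hperm : (q ++ [m]).Perm (x :: y :: t) := he ▸ pvPass_perm _
        have hqmem : ∀ z ∈ q, z ∈ x :: y :: t := fun z hz => hperm.mem_iff.mp (by simp [hz])
        have hgec : (q ++ [m]).Pairwise pvGeCnt := he ▸ pvPass_pairwise_geCnt _ hp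
        have hqgec : q.Pairwise pvGeCnt := (List.pairwise_append.mp hgec).1
        have hqlen : q.length + 1 = t.length + 2 := by
          have := hperm.length_eq
          simpa using this
        rw [he, pvIter_append_max k q m (fun z hz => hall z (hqmem z hz))]
        rw [List.pairwise_append]
        refine ⟨ih q k (by simp at hN; omega) (by simp at hk; omega) hqgec, by simp, ?_⟩
        intro a ha b hb
        have : a ∈ q := (pvIter_perm k q).mem_iff.mp ha
        simp at hb
        subst hb
        exact hall a (hqmem a this)
lemma pvRange_nil (a b : Int) (h : b ≤ a) : PySem.List.pyRange a b 1 = [] := by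
  unfold PySem.List.pyRange; simp; omega

lemma pvBridge : ∀ (m : Nat) (u pre : List (String × Int)), u.length = m →
    (PySem.List.pyRange (pre.length : Int) ((pre.length : Int) + (u.length : Int) - 1) 1).foldl
      pvBubbleStep (pre ++ u) = pre ++ pvPass u := by
  intro m
  induction m with
  | zero =>
    intro u pre hu
    have : u = [] := List.length_eq_zero_iff.mp hu
    subst this
    rw [pvRange_nil _ _ (by simp)]
    simp [pvPass]
  | succ m ih =>
    intro u pre hu
    match u, hu with
    | [x], hu =>
      rw [pvRange_nil _ _ (by simp)]
      simp [pvPass]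
    | x :: y :: t, hu =>
      have hlen : ((x :: y :: t).length : Int) = (t.length : Int) + 2 := by simp; omega
      rw [PySem.List.pyRange_one_cons (by simp; omega)]
      rw [List.foldl_cons]
      have hstep : pvBubbleStep (pre ++ x :: y :: t) (pre.length : Int)
          = pre ++ (if (x.2 == y.2) = true ∧ y.1 < x.1 then y :: x :: t else x :: y :: t) := by
        have hga : PySem.List.pyGetD (pre ++ x :: y :: t) (pre.length : Int) ("", 0) = x := by
          rw [PySem.List.pyGetD_natCast]
          simp [List.getD_eq_getElem?_getD, List.getElem?_append_right (le_refl pre.length)]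
        have hgb : PySem.List.pyGetD (pre ++ x :: y :: t) ((pre.length : Int) + 1) ("", 0) = y := by
          rw [show ((pre.length : Int) + 1) = ((pre.length + 1 : Nat) : Int) by push_cast; ring,
            PySem.List.pyGetD_natCast]
          simp [List.getD_eq_getElem?_getD, List.getElem?_append_right (Nat.le_succ_of_le (le_refl pre.length))]
        unfold pvBubbleStep
        simp only [hga, hgb]
        by_cases h1 : (x.2 == y.2) = true
        · by_cases h2 : y.1 < x.1
          · simp only [h1, h2, if_true, and_true, if_pos trivial]
            rw [show ((pre.length : Int)).toNat = pre.length from Int.toNat_natCast _,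
              show ((pre.length : Int) + 1).toNat = pre.length + 1 by omega]
            rw [List.set_append, if_neg (by omega), List.set_append, if_neg (by omega)]
            simp
          · simp [h1, h2]
        · simp [h1]
      rw [hstep]
      by_cases hc : (x.2 == y.2) = true ∧ y.1 < x.1
      · rw [if_pos hc]
        have := ih (x :: t) (pre ++ [y]) (by simpa using hu)
        rw [show (pre ++ [y]) ++ (x :: t) = pre ++ y :: x :: t by simp] at this
        rw [show (((pre ++ [y]).length : Int)) = (pre.length : Int) + 1 by simp] at this
        rw [show ((pre.length : Int) + 1 + ((x :: t).length : Int) - 1)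
            = (pre.length : Int) + (((x :: y :: t).length : Int)) - 1 by simp; omega] at this
        rw [this]
        have hpass : pvPass (x :: y :: t) = y :: pvPass (x :: t) := by
          simp [pvPass, hc.1, hc.2]
        rw [hpass]
        simp
      · rw [if_neg hc]
        have := ih (y :: t) (pre ++ [x]) (by simpa using hu)
        rw [show (pre ++ [x]) ++ (y :: t) = pre ++ x :: y :: t by simp] at this
        rw [show (((pre ++ [x]).length : Int)) = (pre.length : Int) + 1 by simp] at this
        rw [show ((pre.length : Int) + 1 + ((y :: t).length : Int) - 1)
            = (pre.length : Int) + (((x :: y :: t).length : Int)) - 1 by simp; omega] at this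
        rw [this]
        have hpass : pvPass (x :: y :: t) = x :: pvPass (y :: t) := by
          by_cases h1 : (x.2 == y.2) = true
          · have h2 : ¬ y.1 < x.1 := fun h2 => hc ⟨h1, h2⟩
            simp [pvPass, h1, h2]
          · simp [pvPass, h1]
        rw [hpass]
        simp

lemma pvInner (h : List (String × Int)) :
    (PySem.List.pyRange 0 ((h.length : Int) - 1) 1).foldl pvBubbleStep h = pvPass h := by
  have := pvBridge h.length h [] rfl
  simpa using this

lemma pvOuter (n : Int) : ∀ (l : List Int) (h : List (String × Int)), (h.length : Int) = n →
    l.foldl (fun h _ => (PySem.List.pyRange 0 (n - 1) 1).foldl pvBubbleStep h) h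
      = pvPass^[l.length] h := by
  intro l
  induction l with
  | nil => intro h _; simp
  | cons j l ih =>
    intro h hn
    rw [List.foldl_cons]
    have h1 : (PySem.List.pyRange 0 (n - 1) 1).foldl pvBubbleStep h = pvPass h := by
      rw [← hn]
      exact pvInner h
    rw [h1, ih (pvPass h) (by rw [pvPass_length]; exact hn)]
    simp [Function.iterate_succ_apply]

lemma pvInsert_pairwise : ∀ (ys : List (String × Int)) (x : String × Int),
    ys.Pairwise pvRle → (∀ y ∈ ys, y.2 = x.2 → y.1 ≤ x.1) →
    (PySem.List.insertBy (fun a b => decide ((-a.2 : Int) < -b.2)) x ys).Pairwise pvRle := by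
  intro ys
  induction ys with
  | nil => intro x _ _; simp [PySem.List.insertBy]
  | cons y ys ih =>
    intro x hp hties
    rw [List.pairwise_cons] at hp
    obtain ⟨hy, hys⟩ := hp
    by_cases hb : ((-x.2 : Int) < -y.2)
    · rw [show PySem.List.insertBy (fun a b => decide ((-a.2 : Int) < -b.2)) x (y :: ys)
          = x :: y :: ys by simp [PySem.List.insertBy, hb]]
      rw [List.pairwise_cons]
      refine ⟨?_, List.pairwise_cons.mpr ⟨hy, hys⟩⟩
      intro z hz
      rcases List.mem_cons.mp hz with hzy | hz'
      · rw [hzy]; left; omega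
      · have := hy z hz'
        rw [pvRle] at this ⊢
        left; omega
    · rw [show PySem.List.insertBy (fun a b => decide ((-a.2 : Int) < -b.2)) x (y :: ys)
          = y :: PySem.List.insertBy (fun a b => decide ((-a.2 : Int) < -b.2)) x ys by
          simp [PySem.List.insertBy, hb]]
      rw [List.pairwise_cons]
      refine ⟨?_, ih x hys (fun z hz he => hties z (List.mem_cons_of_mem _ hz) he)⟩
      intro z hz
      rcases (PySem.List.mem_insertBy _ _ _ _).mp hz with hzx | hz'
      · rw [hzx, pvRle]
        rcases lt_or_eq_of_le (by omega : x.2 ≤ y.2) with hlt | heq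
        · left; exact hlt
        · right; exact ⟨heq.symm, hties y (by simp) heq.symm⟩
      · exact hy z hz'

lemma pvFold_pairwise : ∀ (xs acc : List (String × Int)),
    acc.Pairwise pvRle → xs.Pairwise (fun a b => a.1 < b.1) →
    (∀ y ∈ acc, ∀ x ∈ xs, y.1 < x.1) →
    (xs.foldl (fun acc x => PySem.List.insertBy (fun a b => decide ((-a.2 : Int) < -b.2)) x acc) acc).Pairwise pvRle := by
  intro xs
  induction xs with
  | nil => intro acc h _ _; simpa using h
  | cons x xs ih =>
    intro acc hacc hxs hinv
    rw [List.foldl_cons]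
    rw [List.pairwise_cons] at hxs
    refine ih _ (pvInsert_pairwise acc x hacc (fun y hy he => le_of_lt (hinv y hy x (by simp)))) hxs.2 ?_
    intro y hy z hz
    rcases (PySem.List.mem_insertBy _ _ _ _).mp hy with hyx | hy'
    · rw [hyx]; exact hxs.1 z hz
    · exact hinv y hy' z (List.mem_cons_of_mem _ hz)


lemma pvGroup_spec : ∀ (N : Nat) (ws : List String), ws.length ≤ N → ws.Pairwise (· ≤ ·) →
    ∃ d : List String, pvGroupRuns ws = d.map (fun w => (w, (ws.count w : Int)))
      ∧ d.Nodup ∧ (∀ w, w ∈ d ↔ w ∈ ws) ∧ d.Pairwise (· < ·) := by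
  intro N
  induction N with
  | zero =>
    intro ws hN _
    have : ws = [] := List.length_eq_zero_iff.mp (Nat.le_zero.mp hN)
    subst this
    exact ⟨[], by simp [pvGroupRuns], by simp, by simp, by simp⟩
  | succ N ih =>
    intro ws hN hsort
    match ws with
    | [] => exact ⟨[], by simp [pvGroupRuns], by simp, by simp, by simp⟩
    | w :: t =>
      rw [List.pairwise_cons] at hsort
      obtain ⟨hwle, htsort⟩ := hsort
      set tw := t.takeWhile (fun x => x == w) with htw
      set td := t.dropWhile (fun x => x == w) with htd
      have hsplit : tw ++ td = t := List.takeWhile_append_dropWhile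
      have htweq : ∀ z ∈ tw, z = w := by
        intro z hz
        have := List.mem_takeWhile_imp hz
        simpa using this
      have htdsort : td.Pairwise (· ≤ ·) := htsort.sublist (List.dropWhile_sublist _)
      have htdgt : ∀ z ∈ td, w < z := by
        intro z hz
        match htd2 : td, hz with
        | h :: td', hz =>
          have hh : ¬ (h == w) = true := by
            have hne : List.dropWhile (fun x => x == w) t ≠ [] := by rw [← htd]; simp
            have h1 := List.head_dropWhile_not (fun x => x == w) hne
            have h2 : (List.dropWhile (fun x => x == w) t).head? = some h := by rw [← htd]; rfl
            rw [List.head?_eq_head hne] at h2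
            simp only [Option.some.injEq] at h2
            rw [h2] at h1
            simp [h1]
          have hwh : w < h := by
            have hht : h ∈ t := by rw [← hsplit]; simp
            have := hwle h hht
            rcases lt_or_eq_of_le this with h1 | h1
            · exact h1
            · exact absurd (by simp [h1]) hh
          rcases List.mem_cons.mp hz with hzh | hz'
          · rw [hzh]; exact hwh
          · have : h ≤ z := (List.pairwise_cons.mp htdsort).1 z hz'
            exact lt_of_lt_of_le hwh this
      have hcw : (w :: t).count w = 1 + tw.length := by
        rw [List.count_cons_self, ← hsplit, List.count_append]
        have h1 : tw.count w = tw.length := List.count_eq_length.mpr (fun b hb => (htweq b hb).symm)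
        have h2 : td.count w = 0 := List.count_eq_zero.mpr (fun hmem => lt_irrefl w (htdgt w hmem))
        omega
      have hcother : ∀ w', w < w' → (w :: t).count w' = td.count w' := by
        intro w' hlt
        rw [List.count_cons_of_ne (by intro he; rw [he] at hlt; exact lt_irrefl _ hlt), ← hsplit,
          List.count_append]
        have : tw.count w' = 0 := List.count_eq_zero.mpr (fun hmem => by
          have := htweq w' hmem
          rw [this] at hlt
          exact lt_irrefl _ hlt)
        omega
      have hlen : td.length ≤ N := by
        have h1 : td.length ≤ t.length := by rw [htd]; exact List.length_dropWhile_le _ _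
        simp at hN
        omega
      obtain ⟨d', he', hnd', hmem', hlt'⟩ := ih td hlen htdsort
      refine ⟨w :: d', ?_, ?_, ?_, ?_⟩
      · show pvGroupRuns (w :: t) = _
        rw [pvGroupRuns]
        simp only [List.map_cons]
        congr 1
        · rw [hcw]; simp; push_cast; ring
        · rw [he']
          apply List.map_congr_left
          intro w' hw'
          have hwlt := htdgt w' ((hmem' w').mp hw')
          rw [hcother w' hwlt]
      · exact List.nodup_cons.mpr ⟨fun hmem => lt_irrefl w (htdgt w ((hmem' w).mp hmem)), hnd'⟩
      · intro w'
        simp only [List.mem_cons]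
        constructor
        · rintro (rfl | hw')
          · left; rfl
          · right
            rw [← hsplit]
            exact List.mem_append_right _ ((hmem' w').mp hw')
        · rintro (rfl | hw')
          · left; rfl
          · rw [← hsplit] at hw'
            rcases List.mem_append.mp hw' with h1 | h1
            · left; exact htweq w' h1
            · right; exact (hmem' w').mpr h1
      · exact List.pairwise_cons.mpr ⟨fun z hz => htdgt z ((hmem' z).mp hz), hlt'⟩
lemma pvDict_eq (lista_palavras excecoes : List String) :
    lista_palavras.foldl (fun d palavra =>
      if excecoes.contains palavra = false then
        if d.contains palavra = false then d.insert palavra 1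
        else d.insert palavra (d.getD palavra 0 + 1)
      else d) PySem.Dict.empty
    = PySem.Dict.counter (lista_palavras.filter (fun p => !(excecoes.contains p))) := by
  have h1 : lista_palavras.foldl (fun d palavra =>
      if excecoes.contains palavra = false then
        if d.contains palavra = false then d.insert palavra 1
        else d.insert palavra (d.getD palavra 0 + 1)
      else d) (PySem.Dict.empty : PySem.Dict String Int)
      = lista_palavras.foldl (fun d palavra =>
      if excecoes.contains palavra = false then d.insert palavra (d.getD palavra 0 + 1)
      else d) (PySem.Dict.empty : PySem.Dict String Int) := by
    apply PySem.List.foldl_congr_mem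
    intro d w _
    by_cases h : excecoes.contains w = false
    · rw [if_pos h, if_pos h]
      by_cases h2 : d.contains w = false
      · rw [if_pos h2, PySem.Dict.getD_of_not_contains d 0 h2]
        norm_num
      · rw [if_neg h2]
    · rw [if_neg h, if_neg h]
  refine h1.trans ?_
  rw [PySem.List.foldl_ite_eq_foldl_filter (p := fun w => excecoes.contains w = false)]
  rw [List.filter_congr (l := lista_palavras)
    (q := fun p => !(excecoes.contains p)) (fun x _ => by by_cases h : excecoes.contains x <;> simp [h])]
  rw [PySem.Dict.foldl_insert_getD_add_one_eq_counter]

-- ===== VERDICT (by name: the statement is the Claim_ definition above) =====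
theorem calcular_histograma_palavras_spec : Claim_equal_calcular_histograma_palavras := by
  unfold Claim_equal_calcular_histograma_palavras
  intro lista excecoes _
  unfold Spec_calcular_histograma_palavras
  simp only [calcular_histograma_palavras, calcular_histograma_palavras_alt]
  rw [pvDict_eq lista excecoes]
  set fw := lista.filter (fun p => !(excecoes.contains p)) with hfw
  rw [PySem.Dict.items_counter]
  set items := (PySem.Set.ofList fw).map (fun k => (k, (fw.count k : Int))) with hitems
  set hist := PySem.List.sorted items frequencia_tupla true with hhist
  -- A's output is (hist.length - 1) bubble passes over hist
  rw [pvOuter (hist.length : Int) _ hist rfl]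
  set K := (PySem.List.pyRange 0 ((hist.length : Int) - 1) 1).length with hK
  have hKlen : hist.length ≤ K + 1 := by
    rw [hK, PySem.List.length_pyRange_one]
    omega
  have hgec : hist.Pairwise pvGeCnt := PySem.List.sorted_pairwise_rev items frequencia_tupla
  have hApw : (pvPass^[K] hist).Pairwise pvRle :=
    pvIter_sorted hist.length hist K le_rfl hKlen hgec
  have hAperm : (pvPass^[K] hist).Perm items :=
    (pvIter_perm K hist).trans (PySem.List.sorted_perm items frequencia_tupla true)
  -- B's side
  set sw := PySem.List.sorted fw (fun x => x) with hsw
  have hswsort : sw.Pairwise (· ≤ ·) := PySem.List.sorted_pairwise fw (fun x => x)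
  obtain ⟨d, hd, hnd, hmem, hdlt⟩ := pvGroup_spec sw.length sw le_rfl hswsort
  have hcnt : ∀ w, sw.count w = fw.count w :=
    fun w => (PySem.List.sorted_perm fw (fun x => x) false).count_eq w
  have hfun : (fun w => (w, (sw.count w : Int))) = (fun w => (w, (fw.count w : Int))) :=
    funext (fun w => by rw [hcnt w])
  have hdperm : d.Perm (PySem.Set.ofList fw) :=
    (List.perm_ext_iff_of_nodup hnd (PySem.Set.nodup_ofList fw)).mpr
      (fun w => by rw [hmem w, hsw, PySem.List.mem_sorted, PySem.Set.mem_ofList])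
  have hgperm : (pvGroupRuns sw).Perm items := by
    rw [hd, hfun, hitems]
    exact hdperm.map _
  have hBperm : (PySem.List.sorted (pvGroupRuns sw) (fun t => -t.2)).Perm (pvGroupRuns sw) :=
    PySem.List.sorted_perm _ _ false
  have hW : (pvGroupRuns sw).Pairwise (fun a b => a.1 < b.1) := by
    rw [hd, List.pairwise_map]
    exact hdlt
  have hBpw : (PySem.List.sorted (pvGroupRuns sw) (fun t => -t.2)).Pairwise pvRle := by
    rw [PySem.List.sorted_eq_foldl_insertBy]
    exact pvFold_pairwise (pvGroupRuns sw) [] (by simp) hW (by simp)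
  exact PySem.List.eq_of_perm_of_pairwise_le_of_injective pvKey pvKey_inj
    (hAperm.trans (hgperm.symm.trans hBperm.symm))
    (hApw.imp (fun h => (pvRle_iff _ _).mp h))
    (hBpw.imp (fun h => (pvRle_iff _ _).mp h))
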